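-- pv_equiv track=rewrite | github.com/minmunui/PCCP_Practice | 01_Hashing_01/main.py | solution
-- ===== SOURCE A (Python) =====
-- def solution(id_list, report, k):
--     answer = []
--     num_mail = {}
--     for id in id_list:
--         num_mail[id] = 0
--
--     num_reported = {}
--     for id in id_list:
--         num_reported[id] = 0
--
--     report_dict = {}
--     for id in id_list:
--         report_dict[id] = {}
--
--     for report_log in report:
--         temp = report_log.split(" ")
--         reporter = temp[0]
--         reported = temp[1]
--
--         if report_dict[reported].get(reporter) != True:
--             report_dict[reported][reporter] = True
--             num_reported[reported] += 1
--             if num_reported[reported] == k: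
--                 for i_reporter in report_dict[reported].keys():
--                     num_mail[i_reporter] += 1
--             if num_reported[reported] > k:
--                 num_mail[reporter] += 1
--         else:
--             continue
--
--     for id in id_list:
--         answer.append(num_mail[id])
--
--     return answer
-- ===== SOURCE B (Python) =====
-- def solution(id_list, report, k):
--     # dedup (reporter, reported) pairs, preserving nothing order-sensitive
--     pairs = set()
--     for log in report:
--         t = log.split(" ")
--         pairs.add((t[0], t[1]))
--     # how many distinct reporters each user has
--     cnt = {}
--     for reporter, reported in pairs:
--         cnt[reported] = cnt.get(reported, 0) + 1
--     banned = {u for u in cnt if cnt[u] >= k}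
--     mail = {i: 0 for i in id_list}
--     for reporter, reported in pairs:
--         if reported in banned:
--             mail[reporter] += 1
--     return [mail[i] for i in id_list]
-- ===== Notes on version B (the rewrite author's own statement) =====
-- stated objective: idiomatic
-- what changed: A interleaves ban-detection with mail bookkeeping in one stateful pass (incrementing mails exactly when a user's unique-report count crosses k); B decomposes: dedup the (reporter, reported) pairs into a set, count distinct reporters per user, form the banned set by 'count >= k', then one pass over the unique pairs tallies each reporter's mails.
-- outside the precondition, e.g. on solution(['a'], ['x a'], 5): A returns [0], B returns [0]
import Mathlib
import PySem

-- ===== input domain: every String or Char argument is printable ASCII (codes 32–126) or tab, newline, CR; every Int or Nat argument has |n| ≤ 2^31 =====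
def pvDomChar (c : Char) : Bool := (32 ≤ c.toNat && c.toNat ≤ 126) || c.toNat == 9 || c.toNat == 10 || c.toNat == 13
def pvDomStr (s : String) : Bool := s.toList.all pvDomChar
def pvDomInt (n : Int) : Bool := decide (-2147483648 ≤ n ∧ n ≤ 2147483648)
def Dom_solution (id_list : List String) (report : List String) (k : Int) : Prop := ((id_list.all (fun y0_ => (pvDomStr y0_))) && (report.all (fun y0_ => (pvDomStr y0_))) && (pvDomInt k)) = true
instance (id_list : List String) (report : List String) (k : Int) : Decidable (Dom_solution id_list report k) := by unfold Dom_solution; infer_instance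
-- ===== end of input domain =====

-- B replaces A's single stateful pass (mails granted exactly when a user's unique-report
-- count crosses k) by a decomposition: dedup pairs, count reporters, banned set, one tally pass.
-- Equal return values on Pre_; no argument is mutated by either version.

-- ===== PORT A =====
-- A-side helper: the body of A's `for report_log in report` loop, verbatim
def solutionBody (k : Int)
    (st : PySem.Dict String Int × PySem.Dict String Int × PySem.Dict String (PySem.Dict String Bool))
    (report_log : String) :
    PySem.Dict String Int × PySem.Dict String Int × PySem.Dict String (PySem.Dict String Bool) :=
  let (num_mail, num_reported, report_dict) := st
  -- temp = report_log.split(" "); temp[0], temp[1] (IndexError when < 2 parts: outside Pre_)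
  match PySem.Str.split? report_log " " with
  | some (reporter :: reported :: _) =>
    -- report_dict[reported] raises KeyError when absent: outside Pre_; getD is exact on Pre_
    let inner := report_dict.getD reported PySem.Dict.empty
    if inner.get? reporter ≠ some true then
      let inner' := inner.insert reporter true
      let report_dict' := report_dict.insert reported inner'
      let nr := num_reported.getD reported 0 + 1
      let num_reported' := num_reported.insert reported nr
      let num_mail' :=
        if nr == k then
          inner'.keys.foldl (fun m r => m.insert r (m.getD r 0 + 1)) num_mail
        else num_mail
      let num_mail'' :=
        if k < nr then num_mail'.insert reporter (num_mail'.getD reporter 0 + 1)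
        else num_mail'
      (num_mail'', num_reported', report_dict')
    else st
  | _ => st

def solution (id_list : List String) (report : List String) (k : Int) : List Int :=
  let num_mail : PySem.Dict String Int :=
    id_list.foldl (fun d id => d.insert id 0) PySem.Dict.empty
  let num_reported : PySem.Dict String Int :=
    id_list.foldl (fun d id => d.insert id 0) PySem.Dict.empty
  let report_dict : PySem.Dict String (PySem.Dict String Bool) :=
    id_list.foldl (fun d id => d.insert id PySem.Dict.empty) PySem.Dict.empty
  let st := report.foldl (solutionBody k) (num_mail, num_reported, report_dict)
  id_list.map (fun id => st.1.getD id 0)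

-- ===== PORT B =====
-- B-side helper: the body of B's pair-collecting loop, verbatim
def solutionAltAdd (s : PySem.Set (String × String)) (log : String) :
    PySem.Set (String × String) :=
  match PySem.Str.split? log " " with
  | some (a :: b :: _) => PySem.Set.add s (a, b)   -- t[1] IndexError when < 2 parts: outside Pre_
  | _ => s

def solution_alt (id_list : List String) (report : List String) (k : Int) : List Int :=
  let pairs : PySem.Set (String × String) := report.foldl solutionAltAdd PySem.Set.empty
  let cnt : PySem.Dict String Int :=
    pairs.foldl (fun d p => d.insert p.2 (d.getD p.2 0 + 1)) PySem.Dict.empty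
  let banned : List String := cnt.keys.filter (fun u => decide (k ≤ cnt.getD u 0))
  let mail0 : PySem.Dict String Int :=
    id_list.foldl (fun d i => d.insert i 0) PySem.Dict.empty
  let mail := pairs.foldl
    (fun d p => if banned.contains p.2 then d.insert p.1 (d.getD p.1 0 + 1) else d) mail0
  id_list.map (fun i => mail.getD i 0)

-- ===== PRECONDITION & SPEC =====
-- Pre_ restricts to the task's natural domain: every report log splits (on a single space) into
-- at least two fields and both the reporter and the reported id occur in id_list; outside it A
-- raises IndexError/KeyError (except when an unknown reporter never triggers a ban, where both
-- versions agree anyway — see the cite).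
def Pre_solution (id_list : List String) (report : List String) (k : Int) : Prop :=
  (report.all (fun log =>
    match PySem.Str.split? log " " with
    | some (a :: b :: _) => id_list.contains a && id_list.contains b
    | _ => false)) = true
instance (id_list : List String) (report : List String) (k : Int) : Decidable (Pre_solution id_list report k) := by unfold Pre_solution; infer_instance

def pvWitness_solution : List String × List String × Int := (["muzi", "frodo"], ["muzi frodo", "frodo muzi", "muzi frodo"], 1)

def Spec_solution (id_list : List String) (report : List String) (k : Int) (out : List Int) : Prop := out = solution_alt id_list report k
instance (id_list : List String) (report : List String) (k : Int) (out : List Int) : Decidable (Spec_solution id_list report k out) := by unfold Spec_solution; infer_instance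

-- ===== CLAIM (what is proved, stated in full; the proofs are below) =====
def Claim_equal_solution : Prop := ∀ (id_list : List String) (report : List String) (k : Int), Dom_solution id_list report k → Pre_solution id_list report k → Spec_solution id_list report k (solution id_list report k)

-- ===== LEMMAS AND PROOFS =====

-- the (reporter, reported) pair of a report log (only used on logs Pre_ admits)
def pvPair (log : String) : String × String :=
  match PySem.Str.split? log " " with
  | some (a :: b :: _) => (a, b)
  | _ => ("", "")

-- A's loop body, expressed on the parsed pair
def pvStepA (k : Int)
    (st : PySem.Dict String Int × PySem.Dict String Int × PySem.Dict String (PySem.Dict String Bool))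
    (p : String × String) :
    PySem.Dict String Int × PySem.Dict String Int × PySem.Dict String (PySem.Dict String Bool) :=
  let (num_mail, num_reported, report_dict) := st
  let inner := report_dict.getD p.2 PySem.Dict.empty
  if inner.get? p.1 ≠ some true then
    let inner' := inner.insert p.1 true
    let report_dict' := report_dict.insert p.2 inner'
    let nr := num_reported.getD p.2 0 + 1
    let num_reported' := num_reported.insert p.2 nr
    let num_mail' :=
      if nr == k then inner'.keys.foldl (fun m r => m.insert r (m.getD r 0 + 1)) num_mail
      else num_mail
    let num_mail'' :=
      if k < nr then num_mail'.insert p.1 (num_mail'.getD p.1 0 + 1) else num_mail'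
    (num_mail'', num_reported', report_dict')
  else st

-- distinct reporters of y among the pairs Q, in first-occurrence order
def pvRY (Q : List (String × String)) (y : String) : List String :=
  ((PySem.List.dedup Q).filter (fun q => q.2 == y)).map (fun q => q.1)

-- "pair q earns x a mail, judged with the reporter counts of Q"
def pvPred (k : Int) (Q : List (String × String)) (x : String) (q : String × String) : Bool :=
  q.1 == x && decide (k ≤ ((pvRY Q q.2).length : Int))

def pvInv (k : Int) (Q : List (String × String))
    (st : PySem.Dict String Int × PySem.Dict String Int × PySem.Dict String (PySem.Dict String Bool)) : Prop :=
  (∀ y, (st.2.2.getD y PySem.Dict.empty).items = (pvRY Q y).map (fun x => (x, true)))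
  ∧ (∀ y, st.2.1.getD y 0 = ((pvRY Q y).length : Int))
  ∧ (∀ x, st.1.getD x 0 = (((PySem.List.dedup Q).countP (pvPred k Q x) : Nat) : Int))

-- general: folding constant inserts never changes a lookup whose default is that constant
theorem pv_getD_foldl_insert_const {nu : Type} (l : List String) (c : nu)
    (d : PySem.Dict String nu) (y : String) (h : d.getD y c = c) :
    (List.foldl (fun d i => d.insert i c) d l).getD y c = c := by
  induction l generalizing d with
  | nil => exact h
  | cons a t ih =>
    rw [List.foldl_cons]
    refine ih _ ?_
    rw [PySem.Dict.getD_insert]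
    split <;> simp [h]

theorem pv_countP_or_disjoint {α : Type} (p q : α → Bool) (l : List α)
    (h : ∀ a ∈ l, p a = true → q a = false) :
    l.countP (fun a => p a || q a) = l.countP p + l.countP q := by
  induction l with
  | nil => simp
  | cons a t ih =>
    have ht : ∀ a ∈ t, p a = true → q a = false := fun a ha => h a (List.mem_cons_of_mem _ ha)
    have ha := h a (List.mem_cons_self)
    simp only [List.countP_cons, ih ht]
    cases hp : p a <;> cases hq : q a <;> simp_all <;> omega

theorem pv_dedup_append (Q : List (String × String)) (p : String × String) :
    PySem.List.dedup (Q ++ [p]) =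
      if p ∈ Q then PySem.List.dedup Q else PySem.List.dedup Q ++ [p] := by
  simp only [PySem.List.dedup_eq_ofList, PySem.Set.ofList_eq_foldl, List.foldl_append,
    List.foldl_cons, List.foldl_nil]
  rw [PySem.Set.add]
  have hc : (List.foldl PySem.Set.add [] Q).contains p = true ↔ p ∈ Q := by
    rw [PySem.Set.contains, List.contains_iff_mem, ← PySem.Set.ofList_eq_foldl,
      PySem.Set.mem_ofList]
  by_cases hm : p ∈ Q
  · rw [if_pos (hc.mpr hm), if_pos hm]
  · rw [if_neg (fun hco => hm (hc.mp hco)), if_neg hm]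

theorem pv_mem_RY (Q : List (String × String)) (y x : String) :
    x ∈ pvRY Q y ↔ (x, y) ∈ Q := by
  unfold pvRY
  simp only [List.mem_map, List.mem_filter, PySem.List.mem_dedup]
  constructor
  · rintro ⟨q, ⟨hq, hy⟩, rfl⟩
    have : q = (q.1, y) := by
      have := beq_iff_eq.mp hy; exact Prod.ext rfl this
    rwa [← this]
  · intro hxy
    exact ⟨(x, y), ⟨hxy, by simp⟩, rfl⟩

theorem pv_nodup_RY (Q : List (String × String)) (y : String) : (pvRY Q y).Nodup := by
  unfold pvRY
  refine List.Nodup.map_on ?_ (List.Nodup.filter _ (PySem.List.nodup_dedup Q))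
  intro a ha b hb hab
  have hay := beq_iff_eq.mp (List.mem_filter.mp ha).2
  have hby := beq_iff_eq.mp (List.mem_filter.mp hb).2
  exact Prod.ext hab (hay.trans hby.symm)

theorem pv_RY_append_mem (Q : List (String × String)) (p : String × String) (y : String)
    (h : p ∈ Q) : pvRY (Q ++ [p]) y = pvRY Q y := by
  unfold pvRY; rw [pv_dedup_append, if_pos h]

theorem pv_RY_append (Q : List (String × String)) (p : String × String) (y : String)
    (h : p ∉ Q) :
    pvRY (Q ++ [p]) y = if p.2 = y then pvRY Q y ++ [p.1] else pvRY Q y := by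
  unfold pvRY
  rw [pv_dedup_append, if_neg h, List.filter_append, List.map_append]
  by_cases hy : p.2 = y
  · rw [if_pos hy]; simp [hy]
  · rw [if_neg hy]; simp [hy]

theorem pv_keys_of_items (d : PySem.Dict String Bool) (xs : List String)
    (h : d.items = xs.map (fun x => (x, true))) : d.keys = xs := by
  show d.items.map Prod.fst = xs
  rw [h, List.map_map]
  have : (Prod.fst ∘ fun x : String => (x, true)) = id := rfl
  rw [this, List.map_id]

-- reading a dict whose items are xs ↦ true
theorem pv_get?_of_items (d : PySem.Dict String Bool) (xs : List String) (hnd : xs.Nodup)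
    (h : d.items = xs.map (fun x => (x, true))) (a : String) :
    d.get? a = if a ∈ xs then some true else none := by
  have hkeys : d.keys = xs := pv_keys_of_items d xs h
  by_cases hm : a ∈ xs
  · rw [if_pos hm]
    refine (PySem.Dict.get?_eq_some_iff_mem_items d a true (by rw [hkeys]; exact hnd)).mpr ?_
    rw [h, List.mem_map]; exact ⟨a, hm, rfl⟩
  · rw [if_neg hm]
    exact (PySem.Dict.get?_eq_none_iff_not_mem_keys d a).mpr (by rw [hkeys]; exact hm)

theorem pv_count_RY (Q : List (String × String)) (y x : String) :
    (pvRY Q y).count x = (PySem.List.dedup Q).countP (fun q => q.1 == x && q.2 == y) := by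
  unfold pvRY
  rw [List.count_eq_countP, List.countP_map, List.countP_filter]
  rfl

theorem pv_RY_length (Q : List (String × String)) (y : String) :
    (pvRY Q y).length = ((PySem.List.dedup Q).map (fun q => q.2)).count y := by
  unfold pvRY
  rw [List.length_map, List.count_eq_countP, List.countP_map, ← List.countP_eq_length_filter]
  rfl

theorem pv_getD_foldl_insert_snd (P : List (String × String)) (d : PySem.Dict String Int)
    (y : String) :
    (P.foldl (fun d p => d.insert p.2 (d.getD p.2 0 + 1)) d).getD y 0
      = d.getD y 0 + ((P.map (fun q => q.2)).count y : Int) := by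
  induction P generalizing d with
  | nil => simp
  | cons p t ih =>
    rw [List.foldl_cons, ih, PySem.Dict.getD_insert, List.map_cons, List.count_cons]
    by_cases hy : y = p.2
    · have hb : (p.2 == y) = true := by simp [hy]
      rw [if_pos hy, hb, hy]
      push_cast; simp; omega
    · have hb : (p.2 == y) = false := by simp; exact fun hh => hy hh.symm
      rw [if_neg hy, hb]
      simp

theorem pv_getD_foldl_insert_fst (P : List (String × String)) (d : PySem.Dict String Int)
    (x : String) :
    (P.foldl (fun d p => d.insert p.1 (d.getD p.1 0 + 1)) d).getD x 0
      = d.getD x 0 + ((P.map (fun q => q.1)).count x : Int) := by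
  induction P generalizing d with
  | nil => simp
  | cons p t ih =>
    rw [List.foldl_cons, ih, PySem.Dict.getD_insert, List.map_cons, List.count_cons]
    by_cases hx : x = p.1
    · have hb : (p.1 == x) = true := by simp [hx]
      rw [if_pos hx, hb, hx]
      push_cast; simp; omega
    · have hb : (p.1 == x) = false := by simp; exact fun hh => hx hh.symm
      rw [if_neg hx, hb]
      simp

theorem pv_step_inv (k : Int) (Q : List (String × String)) (p : String × String)
    (st : PySem.Dict String Int × PySem.Dict String Int × PySem.Dict String (PySem.Dict String Bool))
    (h : pvInv k Q st) : pvInv k (Q ++ [p]) (pvStepA k st p) := by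
  obtain ⟨m, c, rd⟩ := st
  obtain ⟨h1, h2, h3⟩ := h
  have h1' : ∀ y, (rd.getD y PySem.Dict.empty).items = (pvRY Q y).map (fun x => (x, true)) := h1
  have h2' : ∀ y, c.getD y 0 = ((pvRY Q y).length : Int) := h2
  have h3' : ∀ x, m.getD x 0 = (((PySem.List.dedup Q).countP (pvPred k Q x) : Nat) : Int) := h3
  have hnd := pv_nodup_RY Q p.2
  have hget := pv_get?_of_items (rd.getD p.2 PySem.Dict.empty) (pvRY Q p.2) hnd (h1' p.2) p.1
  by_cases hmem : p ∈ Q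
  · -- duplicate pair: A's loop body is a no-op, and the dedup/counters do not move
    have hsome : (rd.getD p.2 PySem.Dict.empty).get? p.1 = some true := by
      rw [hget, if_pos ((pv_mem_RY Q p.2 p.1).mpr (by simpa using hmem))]
    have hstep : pvStepA k (m, c, rd) p = (m, c, rd) := by
      unfold pvStepA; simp [hsome]
    rw [hstep]
    have hRY : ∀ y, pvRY (Q ++ [p]) y = pvRY Q y := fun y => pv_RY_append_mem Q p y hmem
    have hD : PySem.List.dedup (Q ++ [p]) = PySem.List.dedup Q := by
      rw [pv_dedup_append, if_pos hmem]
    refine ⟨fun y => by rw [hRY]; exact h1' y, fun y => by rw [hRY]; exact h2' y, fun x => ?_⟩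
    show m.getD x 0 = _
    rw [hD, h3' x]
    congr 1
    refine List.countP_congr fun q _ => ?_
    unfold pvPred; rw [hRY]
  · -- new pair
    have hnotin : p.1 ∉ pvRY Q p.2 := fun hx => hmem (by
      have := (pv_mem_RY Q p.2 p.1).mp hx; simpa using this)
    have hnone : (rd.getD p.2 PySem.Dict.empty).get? p.1 = none := by
      rw [hget, if_neg hnotin]
    have hRY : ∀ y, pvRY (Q ++ [p]) y = if p.2 = y then pvRY Q y ++ [p.1] else pvRY Q y :=
      fun y => pv_RY_append Q p y hmem
    have hD : PySem.List.dedup (Q ++ [p]) = PySem.List.dedup Q ++ [p] := by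
      rw [pv_dedup_append, if_neg hmem]
    have hnc : (rd.getD p.2 PySem.Dict.empty).contains p.1 = false := by
      rw [← Bool.not_eq_true]
      intro hco
      exact hnotin (by
        rw [← pv_keys_of_items (rd.getD p.2 PySem.Dict.empty) (pvRY Q p.2) (h1' p.2)]
        exact (PySem.Dict.contains_iff_mem_keys _ _).mp hco)
    have hitems' :
        ((rd.getD p.2 PySem.Dict.empty).insert p.1 true).items =
          (pvRY Q p.2 ++ [p.1]).map (fun x => (x, true)) := by
      rw [PySem.Dict.items_insert_of_not_contains _ _ hnc, h1' p.2, List.map_append]; rfl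
    have hkeys' :
        ((rd.getD p.2 PySem.Dict.empty).insert p.1 true).keys = pvRY Q p.2 ++ [p.1] :=
      pv_keys_of_items _ _ hitems'
    have hstep22 : (pvStepA k (m, c, rd) p).2.2 =
        rd.insert p.2 ((rd.getD p.2 PySem.Dict.empty).insert p.1 true) := by
      unfold pvStepA; simp [hnone]
    have hstep21 : (pvStepA k (m, c, rd) p).2.1 = c.insert p.2 (c.getD p.2 0 + 1) := by
      unfold pvStepA; simp [hnone]
    set n : Nat := (pvRY Q p.2).length with hn
    have hcn : c.getD p.2 0 = (n : Int) := h2' p.2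
    refine ⟨fun y => ?_, fun y => ?_, fun x => ?_⟩
    · -- report_dict component
      rw [hstep22, PySem.Dict.getD_insert]
      by_cases hy : y = p.2
      · rw [if_pos hy, hitems', hRY y, if_pos hy.symm, hy]
      · rw [if_neg hy, hRY y, if_neg (fun hh => hy hh.symm)]
        exact h1' y
    · -- num_reported component
      rw [hstep21, PySem.Dict.getD_insert]
      by_cases hy : y = p.2
      · rw [if_pos hy, hRY y, if_pos hy.symm, hcn, hy]
        simp [hn]
      · rw [if_neg hy, hRY y, if_neg (fun hh => hy hh.symm)]
        exact h2' y
    · -- num_mail component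
      have hRYp : pvRY (Q ++ [p]) p.2 = pvRY Q p.2 ++ [p.1] := by rw [hRY p.2, if_pos rfl]
      have hpredp : pvPred k (Q ++ [p]) x p =
          (p.1 == x && decide (k ≤ (n : Int) + 1)) := by
        unfold pvPred; rw [hRYp]
        simp [hn]
      have hRHS : (((PySem.List.dedup (Q ++ [p])).countP (pvPred k (Q ++ [p]) x) : Nat) : Int) =
          (((PySem.List.dedup Q).countP (pvPred k (Q ++ [p]) x) : Nat) : Int) +
            (if (p.1 == x && decide (k ≤ (n : Int) + 1)) = true then 1 else 0) := by
        rw [hD, List.countP_append]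
        have hsing : List.countP (pvPred k (Q ++ [p]) x) [p] =
            if (p.1 == x && decide (k ≤ (n : Int) + 1)) = true then 1 else 0 := by
          rw [show ([p] : List (String × String)) = p :: [] from rfl, List.countP_cons,
            List.countP_nil, hpredp]
          exact Nat.zero_add _
        rw [hsing]
        push_cast
        rfl
      rcases lt_trichotomy k ((n : Int) + 1) with hk | hk | hk
      · -- k < n+1 : the user was already banned (k ≤ n); only the new pair earns a mail
        have hf2 : ((c.getD p.2 0 + 1) == k) = false := by rw [hcn]; simp; omega
        have ht2 : k < c.getD p.2 0 + 1 := by rw [hcn]; omega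
        have hm' : (pvStepA k (m, c, rd) p).1 = m.insert p.1 (m.getD p.1 0 + 1) := by
          unfold pvStepA; simp [hnone, hf2, ht2]
        have hcong : ∀ q ∈ PySem.List.dedup Q,
            pvPred k (Q ++ [p]) x q = true ↔ pvPred k Q x q = true := by
          intro q hq
          unfold pvPred
          rw [hRY q.2]
          by_cases hy : p.2 = q.2
          · rw [if_pos hy]
            have hlen : (pvRY Q q.2).length = n := by rw [← hy]
            have hd1 : decide (k ≤ ((pvRY Q q.2 ++ [p.1]).length : Int)) = true := by
              simp only [List.length_append, hlen]; simp; omega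
            have hd2 : decide (k ≤ ((pvRY Q q.2).length : Int)) = true := by
              simp only [hlen]; simp; omega
            rw [hd1, hd2]
          · rw [if_neg hy]
        have hdec : decide (k ≤ (n : Int) + 1) = true := by simp; omega
        rw [hm', PySem.Dict.getD_insert, hRHS, List.countP_congr hcong]
        simp only [hdec, Bool.and_true]
        by_cases hx : x = p.1
        · rw [if_pos hx, h3' p.1, hx]
          simp
        · rw [if_neg hx, h3' x]
          have : (p.1 == x) = false := by simp; exact fun hh => hx hh.symm
          simp [this]
      · -- k = n+1 : the ban fires now; everyone who reported p.2 gets a mail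
        have ht1 : ((c.getD p.2 0 + 1) == k) = true := by rw [hcn]; simp [hk]
        have hf1 : ¬ (k < c.getD p.2 0 + 1) := by rw [hcn]; omega
        have hm' : (pvStepA k (m, c, rd) p).1 =
            List.foldl (fun m r => m.insert r (m.getD r 0 + 1)) m
              ((rd.getD p.2 PySem.Dict.empty).insert p.1 true).keys := by
          unfold pvStepA; simp [hnone, ht1, hf1]
        have hcong : ∀ q ∈ PySem.List.dedup Q,
            pvPred k (Q ++ [p]) x q = true ↔
              (pvPred k Q x q || (q.1 == x && q.2 == p.2)) = true := by
          intro q hq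
          unfold pvPred
          rw [hRY q.2]
          by_cases hy : p.2 = q.2
          · rw [if_pos hy]
            have hlen : (pvRY Q q.2).length = n := by rw [← hy]
            have hd1 : decide (k ≤ ((pvRY Q q.2 ++ [p.1]).length : Int)) = true := by
              simp only [List.length_append, hlen]; simp; omega
            have hd2 : decide (k ≤ ((pvRY Q q.2).length : Int)) = false := by
              simp only [hlen]; simp; omega
            have hq2 : (q.2 == p.2) = true := by simp [← hy]
            rw [hd1, hd2, hq2]
            simp
          · rw [if_neg hy]
            have hq2 : (q.2 == p.2) = false := by simp; exact fun hh => hy hh.symm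
            rw [hq2]
            simp
        have hdisj : ∀ q ∈ PySem.List.dedup Q, pvPred k Q x q = true →
            (q.1 == x && q.2 == p.2) = false := by
          intro q hq hp
          unfold pvPred at hp
          by_cases hy : q.2 = p.2
          · exfalso
            have hlen : (pvRY Q q.2).length = n := by rw [hy]
            have hdec := (Bool.and_eq_true _ _).mp hp |>.2
            rw [hlen] at hdec
            have := of_decide_eq_true hdec
            omega
          · have : (q.2 == p.2) = false := by simp [hy]
            simp [this]
        have hdec : decide (k ≤ (n : Int) + 1) = true := by simp; omega
        rw [hm', hkeys', PySem.Dict.getD_foldl_insert_add_one, h3' x, List.count_append,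
          List.count_singleton, hRHS, List.countP_congr hcong,
          pv_countP_or_disjoint _ _ _ hdisj, ← pv_count_RY]
        simp only [hdec, Bool.and_true]
        by_cases hx : (p.1 == x) = true
        · simp only [hx]
          push_cast
          ring
        · simp only [Bool.not_eq_true] at hx
          simp only [hx]
          push_cast
          ring
      · -- n+1 < k : nothing changes
        have hf2 : ((c.getD p.2 0 + 1) == k) = false := by rw [hcn]; simp; omega
        have hf1 : ¬ (k < c.getD p.2 0 + 1) := by rw [hcn]; omega
        have hm' : (pvStepA k (m, c, rd) p).1 = m := by
          unfold pvStepA; simp [hnone, hf2, hf1]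
        have hcong : ∀ q ∈ PySem.List.dedup Q,
            pvPred k (Q ++ [p]) x q = true ↔ pvPred k Q x q = true := by
          intro q hq
          unfold pvPred
          rw [hRY q.2]
          by_cases hy : p.2 = q.2
          · rw [if_pos hy]
            have hlen : (pvRY Q q.2).length = n := by rw [← hy]
            have hd1 : decide (k ≤ ((pvRY Q q.2 ++ [p.1]).length : Int)) = false := by
              simp only [List.length_append, hlen]; simp; omega
            have hd2 : decide (k ≤ ((pvRY Q q.2).length : Int)) = false := by
              simp only [hlen]; simp; omega
            rw [hd1, hd2]
          · rw [if_neg hy]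
        have hdec : decide (k ≤ (n : Int) + 1) = false := by simp; omega
        rw [hm', h3' x, hRHS, List.countP_congr hcong]
        simp [hdec]

theorem pv_fold_inv (k : Int) (L : List (String × String)) :
    ∀ (Q : List (String × String)) st, pvInv k Q st →
      pvInv k (Q ++ L) (L.foldl (pvStepA k) st) := by
  induction L with
  | nil => intro Q st h; simpa using h
  | cons p t ih =>
    intro Q st h
    rw [List.foldl_cons, show Q ++ p :: t = (Q ++ [p]) ++ t by simp]
    exact ih (Q ++ [p]) _ (pv_step_inv k Q p st h)

theorem pv_RY_nil (y : String) : pvRY [] y = [] := by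
  unfold pvRY
  simp [PySem.List.dedup_eq_ofList, PySem.Set.ofList_eq_foldl]

theorem pv_dedup_nil : PySem.List.dedup ([] : List (String × String)) = [] := by
  simp [PySem.List.dedup_eq_ofList, PySem.Set.ofList_eq_foldl]

theorem pv_init_inv (id_list : List String) (k : Int) :
    pvInv k []
      (id_list.foldl (fun d id => d.insert id 0) PySem.Dict.empty,
       id_list.foldl (fun d id => d.insert id 0) PySem.Dict.empty,
       id_list.foldl (fun d id => d.insert id PySem.Dict.empty) PySem.Dict.empty) := by
  refine ⟨fun y => ?_, fun y => ?_, fun x => ?_⟩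
  · show ((List.foldl (fun d id => d.insert id PySem.Dict.empty) PySem.Dict.empty
        id_list).getD y PySem.Dict.empty).items = List.map (fun x => (x, true)) (pvRY [] y)
    rw [pv_getD_foldl_insert_const id_list PySem.Dict.empty _ y
      (PySem.Dict.getD_empty y PySem.Dict.empty), pv_RY_nil]
    rfl
  · show (List.foldl (fun d id => d.insert id 0) PySem.Dict.empty id_list).getD y 0 =
      ((pvRY [] y).length : Int)
    rw [pv_getD_foldl_insert_const id_list 0 _ y (PySem.Dict.getD_empty y 0), pv_RY_nil]
    rfl
  · show (List.foldl (fun d id => d.insert id 0) PySem.Dict.empty id_list).getD x 0 =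
      (((PySem.List.dedup ([] : List (String × String))).countP (pvPred k [] x) : Nat) : Int)
    rw [pv_getD_foldl_insert_const id_list 0 _ x (PySem.Dict.getD_empty x 0), pv_dedup_nil]
    rfl

-- under Pre_, every log parses into two ids of id_list
theorem pv_pre_split (id_list : List String) (report : List String) (k : Int)
    (hpre : Pre_solution id_list report k) (log : String) (hlog : log ∈ report) :
    ∃ a b rest, PySem.Str.split? log " " = some (a :: b :: rest) ∧
      a ∈ id_list ∧ b ∈ id_list ∧ pvPair log = (a, b) := by
  unfold Pre_solution at hpre
  have h := (List.all_eq_true.mp hpre) log hlog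
  unfold pvPair
  cases hs : PySem.Str.split? log " " with
  | none => rw [hs] at h; simp at h
  | some l =>
    cases l with
    | nil => rw [hs] at h; simp at h
    | cons a t =>
      cases t with
      | nil => rw [hs] at h; simp at h
      | cons b rest =>
        rw [hs] at h
        simp only [Bool.and_eq_true, List.contains_iff_mem] at h
        exact ⟨a, b, rest, rfl, h.1, h.2, rfl⟩

theorem pv_foldl_pairA (k : Int) (l : List String)
    (init : PySem.Dict String Int × PySem.Dict String Int × PySem.Dict String (PySem.Dict String Bool)) :
    List.foldl (fun st log => pvStepA k st (pvPair log)) init l =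
      List.foldl (pvStepA k) init (l.map pvPair) := by
  induction l generalizing init with
  | nil => rfl
  | cons a t ih => rw [List.foldl_cons, List.map_cons, List.foldl_cons, ih]

theorem pv_foldl_pairB (l : List String) (init : PySem.Set (String × String)) :
    List.foldl (fun s log => PySem.Set.add s (pvPair log)) init l =
      List.foldl PySem.Set.add init (l.map pvPair) := by
  induction l generalizing init with
  | nil => rfl
  | cons a t ih => rw [List.foldl_cons, List.map_cons, List.foldl_cons, ih]

theorem pv_body_eq (k : Int)
    (st : PySem.Dict String Int × PySem.Dict String Int × PySem.Dict String (PySem.Dict String Bool))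
    (log a b : String) (rest : List String)
    (hs : PySem.Str.split? log " " = some (a :: b :: rest)) :
    solutionBody k st log = pvStepA k st (a, b) := by
  obtain ⟨m, c, rd⟩ := st
  unfold solutionBody pvStepA
  rw [hs]

theorem pv_solution_eq (id_list : List String) (report : List String) (k : Int)
    (hpre : Pre_solution id_list report k) :
    solution id_list report k =
      id_list.map (fun x =>
        ((((PySem.List.dedup (report.map pvPair)).countP
            (pvPred k (report.map pvPair) x)) : Nat) : Int)) := by
  unfold solution
  simp only []
  rw [PySem.List.foldl_congr_mem report (solutionBody k)
    (fun st log => pvStepA k st (pvPair log)) _ (fun acc log hlog => by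
      obtain ⟨a, b, rest, hs, _, _, hp⟩ := pv_pre_split id_list report k hpre log hlog
      show solutionBody k acc log = pvStepA k acc (pvPair log)
      rw [hp]
      exact pv_body_eq k acc log a b rest hs)]
  rw [pv_foldl_pairA]
  have hinv := pv_fold_inv k (report.map pvPair) [] _ (pv_init_inv id_list k)
  rw [List.nil_append] at hinv
  exact List.map_congr_left fun x _ => hinv.2.2 x

theorem pv_banned_mem (L : List (String × String)) (k : Int) (p : String × String)
    (hp : p ∈ PySem.List.dedup L) :
    ((((PySem.List.dedup L).foldl (fun d p => d.insert p.2 (d.getD p.2 0 + 1))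
        (PySem.Dict.empty : PySem.Dict String Int)).keys.filter
        (fun u => decide (k ≤ ((PySem.List.dedup L).foldl
          (fun d p => d.insert p.2 (d.getD p.2 0 + 1))
          (PySem.Dict.empty : PySem.Dict String Int)).getD u 0))).contains p.2)
      = decide (k ≤ ((pvRY L p.2).length : Int)) := by
  have hcntD : ∀ y, ((PySem.List.dedup L).foldl (fun d p => d.insert p.2 (d.getD p.2 0 + 1))
      (PySem.Dict.empty : PySem.Dict String Int)).getD y 0 =
      (((PySem.List.dedup L).map (fun q => q.2)).count y : Int) := by
    intro y
    rw [pv_getD_foldl_insert_snd, PySem.Dict.getD_empty]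
    simp
  have hkeys : ((PySem.List.dedup L).foldl (fun d p => d.insert p.2 (d.getD p.2 0 + 1))
      (PySem.Dict.empty : PySem.Dict String Int)).keys =
      PySem.Set.ofList ((PySem.List.dedup L).map (fun q => q.2)) := by
    rw [PySem.Dict.keys_foldl_insert_key (PySem.List.dedup L) (fun p => p.2)
      (fun d p => d.getD p.2 0 + 1) PySem.Dict.empty, PySem.Dict.keys_empty,
      PySem.Set.update_nil_left]
  have hlen : ((pvRY L p.2).length : Int) =
      (((PySem.List.dedup L).map (fun q => q.2)).count p.2 : Int) := by
    rw [pv_RY_length]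
  by_cases hk : k ≤ ((pvRY L p.2).length : Int)
  · rw [decide_eq_true hk]
    refine List.contains_iff_mem.mpr (List.mem_filter.mpr ⟨?_, ?_⟩)
    · rw [hkeys]
      exact (PySem.Set.mem_ofList _ _).mpr (List.mem_map.mpr ⟨p, hp, rfl⟩)
    · rw [hcntD p.2]
      exact decide_eq_true (by rw [← hlen]; exact hk)
  · rw [decide_eq_false hk, ← Bool.not_eq_true, List.contains_iff_mem]
    intro hmem
    have := (List.mem_filter.mp hmem).2
    rw [hcntD p.2] at this
    exact hk (by rw [hlen]; exact of_decide_eq_true this)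

theorem pv_alt_eq (id_list : List String) (report : List String) (k : Int)
    (hpre : Pre_solution id_list report k) :
    solution_alt id_list report k =
      id_list.map (fun x =>
        ((((PySem.List.dedup (report.map pvPair)).countP
            (pvPred k (report.map pvPair) x)) : Nat) : Int)) := by
  unfold solution_alt
  simp only []
  rw [PySem.List.foldl_congr_mem report solutionAltAdd
    (fun s log => PySem.Set.add s (pvPair log)) PySem.Set.empty (fun acc log hlog => by
      obtain ⟨a, b, rest, hs, _, _, hp⟩ := pv_pre_split id_list report k hpre log hlog
      show solutionAltAdd acc log = PySem.Set.add acc (pvPair log)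
      rw [hp]
      unfold solutionAltAdd
      rw [hs])]
  rw [pv_foldl_pairB, show (PySem.Set.empty : PySem.Set (String × String)) = [] from rfl,
    ← PySem.Set.ofList_eq_foldl, ← PySem.List.dedup_eq_ofList]
  refine List.map_congr_left fun x _ => ?_
  rw [PySem.List.foldl_if_eq_foldl_filter]
  rw [pv_getD_foldl_insert_fst]
  rw [pv_getD_foldl_insert_const id_list 0 _ x (PySem.Dict.getD_empty x 0)]
  rw [List.count_eq_countP, List.countP_map, List.countP_filter]
  rw [List.countP_congr (fun q hq => by
    simp only [Function.comp_apply]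
    rw [pv_banned_mem (report.map pvPair) k q hq])]
  rw [zero_add]
  rfl

-- ===== VERDICT (by name: the statement is the Claim_ definition above) =====
theorem solution_spec : Claim_equal_solution := by
  intro id_list report k _hdom hpre
  unfold Spec_solution
  rw [pv_solution_eq id_list report k hpre, pv_alt_eq id_list report k hpre]
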